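-- pv_equiv track=rewrite | github.com/marnixbroek/computer_science_paper | main.py | qGramDistance
-- ===== SOURCE A (Python) =====
-- from collections import Counter
--
-- _QGRAM_CACHE = {}
--
-- _QGRAM_DISTANCE_CACHE = {}
--
-- def get_qgram_counter_cached(s, q):
--     key = (s, q)
--     if key not in _QGRAM_CACHE:
--         _QGRAM_CACHE[key] = Counter(s[i:i+q] for i in range(len(s) - q + 1))
--     return _QGRAM_CACHE[key]
--
-- def qGramDistance(s1, s2, q):
--     """Calculate the q-gram distance between two strings."""
--     key = (s1, s2, q)
--     if key in _QGRAM_DISTANCE_CACHE: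
--         return _QGRAM_DISTANCE_CACHE[key]
--
--     c1 = get_qgram_counter_cached(s1, q)
--     c2 = get_qgram_counter_cached(s2, q)
--
--     keys = c1.keys() | c2.keys()
--
--     dist = 0
--     for k in keys:
--         dist += abs(c1.get(k, 0) - c2.get(k, 0))
--
--     _QGRAM_DISTANCE_CACHE[key] = dist
--     return dist
-- ===== SOURCE B (Python) =====
-- def qGramDistance(s1, s2, q):
--     """Calculate the q-gram distance between two strings.
--
--     Sort-and-merge algorithm: sort both q-gram lists, count the multiset
--     intersection with a two-pointer merge, and return n1 + n2 - 2*matches.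
--     No hash tables/Counters at all; return value only (no memo caches)."""
--     g1 = sorted(s1[i:i+q] for i in range(len(s1) - q + 1))
--     g2 = sorted(s2[i:i+q] for i in range(len(s2) - q + 1))
--     i = j = m = 0
--     while i < len(g1) and j < len(g2):
--         if g1[i] == g2[j]:
--             m += 1
--             i += 1
--             j += 1
--         elif g1[i] < g2[j]:
--             i += 1
--         else:
--             j += 1
--     return len(g1) + len(g2) - 2 * m
-- ===== Notes on version B (the rewrite author's own statement) =====
-- stated objective: alternative
-- what changed: Replaced the hash-based profile comparison (two cached Counters plus a key-set union loop summing |c1-c2|) by a sort-and-merge algorithm: sort both q-gram lists and count the multiset intersection with a two-pointer merge, returning n1+n2-2*matches; B drops A's module-level memo caches, so only the return value is claimed equal.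
import Mathlib
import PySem

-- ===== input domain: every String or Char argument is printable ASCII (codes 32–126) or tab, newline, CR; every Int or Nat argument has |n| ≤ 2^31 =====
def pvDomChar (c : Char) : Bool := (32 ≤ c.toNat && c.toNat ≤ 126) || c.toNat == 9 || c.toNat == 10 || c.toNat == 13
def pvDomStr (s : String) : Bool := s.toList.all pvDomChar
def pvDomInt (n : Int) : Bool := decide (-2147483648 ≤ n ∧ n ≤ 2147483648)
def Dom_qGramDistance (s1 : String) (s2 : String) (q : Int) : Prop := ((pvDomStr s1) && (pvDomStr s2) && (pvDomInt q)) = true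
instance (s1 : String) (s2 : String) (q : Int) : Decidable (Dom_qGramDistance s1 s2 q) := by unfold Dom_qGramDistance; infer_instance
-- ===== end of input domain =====

-- B replaces A's two cached Counters + key-set union by sort-and-merge: sort both q-gram lists,
-- count the multiset intersection with a two-pointer merge, return n1+n2-2*matches; objective:
-- alternative. B omits A's module-level memo caches, so only the RETURN VALUE is claimed equal.


-- ===== PORT A =====
-- the q-gram list  [s[i:i+q] for i in range(len(s) - q + 1)]  (shared gram expression of both programs)
def pvGrams (s : List Char) (q : Int) : List (List Char) :=
  (PySem.List.pyRange 0 ((s.length : Int) - q + 1) 1).map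
    (fun i => PySem.List.slice s (some i) (some (i + q)))

-- A: two Counters (the memo caches only store results of this pure computation), key-set union, sum |c1-c2|
def qGramDistance (s1 : String) (s2 : String) (q : Int) : Int :=
  let c1 := PySem.Dict.counter (pvGrams s1.toList q)
  let c2 := PySem.Dict.counter (pvGrams s2.toList q)
  let keys := PySem.Set.union (PySem.Set.ofList (PySem.Dict.keys c1)) (PySem.Dict.keys c2)
  keys.foldl (fun dist k => dist + |PySem.Dict.getD c1 k 0 - PySem.Dict.getD c2 k 0|) 0

-- ===== PORT B =====
-- two-pointer merge over the two sorted gram lists, counting matched pairs (Source B's while loop)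
def pvMergeCount : List (List Char) → List (List Char) → Int
  | [], _ => 0
  | _ :: _, [] => 0
  | x :: xs, y :: ys =>
      if x = y then 1 + pvMergeCount xs ys
      else if x < y then pvMergeCount xs (y :: ys)
      else pvMergeCount (x :: xs) ys
  termination_by xs ys => xs.length + ys.length

def qGramDistance_alt (s1 : String) (s2 : String) (q : Int) : Int :=
  let g1 := PySem.List.sorted (pvGrams s1.toList q) (fun x => x)
  let g2 := PySem.List.sorted (pvGrams s2.toList q) (fun x => x)
  (g1.length : Int) + (g2.length : Int) - 2 * pvMergeCount g1 g2

-- ===== PRECONDITION & SPEC =====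
def Spec_qGramDistance (s1 : String) (s2 : String) (q : Int) (out : Int) : Prop := out = qGramDistance_alt s1 s2 q
instance (s1 : String) (s2 : String) (q : Int) (out : Int) : Decidable (Spec_qGramDistance s1 s2 q out) := by unfold Spec_qGramDistance; infer_instance

-- ===== CLAIM (what is proved, stated in full; the proofs are below) =====
def Claim_equal_qGramDistance : Prop := ∀ (s1 : String) (s2 : String) (q : Int), Dom_qGramDistance s1 s2 q → Spec_qGramDistance s1 s2 q (qGramDistance s1 s2 q)

-- ===== LEMMAS AND PROOFS =====

-- (x ::ₘ s) ∩ t = s ∩ t when x ∉ t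
theorem pv_cons_inter_of_notMem {α : Type} [DecidableEq α] (x : α) (s t : Multiset α)
    (h : x ∉ t) : (x ::ₘ s) ∩ t = s ∩ t := by
  ext a
  simp only [Multiset.count_inter, Multiset.count_cons]
  by_cases hax : a = x
  · subst hax; simp [Multiset.count_eq_zero_of_notMem h]
  · simp [hax]

-- s ∩ (y ::ₘ t) = s ∩ t when y ∉ s
theorem pv_inter_cons_of_notMem {α : Type} [DecidableEq α] (y : α) (s t : Multiset α)
    (h : y ∉ s) : s ∩ (y ::ₘ t) = s ∩ t := by
  ext a
  simp only [Multiset.count_inter, Multiset.count_cons]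
  by_cases hay : a = y
  · subst hay; simp [Multiset.count_eq_zero_of_notMem h]
  · simp [hay]

-- (x ::ₘ s) ∩ (x ::ₘ t) = x ::ₘ (s ∩ t)
theorem pv_cons_inter_cons {α : Type} [DecidableEq α] (x : α) (s t : Multiset α) :
    (x ::ₘ s) ∩ (x ::ₘ t) = x ::ₘ (s ∩ t) := by
  ext a
  simp only [Multiset.count_inter, Multiset.count_cons]
  by_cases hax : a = x
  · subst hax; simp [Nat.succ_min_succ]
  · simp [hax]

-- the two-pointer merge on sorted lists counts the multiset intersection
theorem pv_mergeCount_eq_card_inter (xs ys : List (List Char)) :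
    xs.Pairwise (· ≤ ·) → ys.Pairwise (· ≤ ·) →
    pvMergeCount xs ys = (((xs : Multiset (List Char)) ∩ (ys : Multiset (List Char))).card : Int) := by
  induction xs, ys using pvMergeCount.induct with
  | case1 t => intro _ _; simp [pvMergeCount]
  | case2 x xs => intro _ _; simp [pvMergeCount]
  | case3 xs y ys ih =>
      intro hx hy
      rw [pvMergeCount]
      rw [ih hx.tail hy.tail]
      rw [show ((y :: xs : List (List Char)) : Multiset (List Char)) = y ::ₘ (xs : Multiset (List Char)) from rfl,
          show ((y :: ys : List (List Char)) : Multiset (List Char)) = y ::ₘ (ys : Multiset (List Char)) from rfl,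
          pv_cons_inter_cons]
      simp
      omega
  | case4 x xs y ys hne hlt ih =>
      intro hx hy
      rw [pvMergeCount, if_neg hne, if_pos hlt, ih hx.tail hy]
      have hnot : x ∉ (y :: ys) := by
        intro hmem
        rcases List.mem_cons.1 hmem with h | h
        · exact hne h
        · exact absurd (List.rel_of_pairwise_cons hy h) (not_le.2 hlt)
      rw [show ((x :: xs : List (List Char)) : Multiset (List Char)) = x ::ₘ (xs : Multiset (List Char)) from rfl,
          pv_cons_inter_of_notMem _ _ _ (by simpa using hnot)]
  | case5 x xs y ys hne hnlt ih =>
      intro hx hy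
      rw [pvMergeCount, if_neg hne, if_neg hnlt, ih hx hy.tail]
      have hylt : y < x := lt_of_le_of_ne (not_lt.1 hnlt) (fun h => hne h.symm)
      have hnot : y ∉ (x :: xs) := by
        intro hmem
        rcases List.mem_cons.1 hmem with h | h
        · exact hne h.symm
        · exact absurd (List.rel_of_pairwise_cons hx h) (not_le.2 hylt)
      rw [show ((y :: ys : List (List Char)) : Multiset (List Char)) = y ::ₘ (ys : Multiset (List Char)) from rfl,
          pv_inter_cons_of_notMem _ _ _ (by simpa using hnot)]

-- the 0/1 indicator sum is the occurrence count
theorem pv_sum_indicator (L : List (List Char)) (a : List Char) :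
    (L.map (fun k => if k = a then (1 : Int) else 0)).sum = (L.count a : Int) := by
  induction L with
  | nil => simp
  | cons x L ih =>
      simp only [List.map_cons, List.sum_cons, ih, List.count_cons]
      by_cases h : x = a
      · subst h; simp; ring
      · simp [h]

-- summing a multiset's counts over a nodup list covering its support gives its cardinality
theorem pv_sum_count_eq_card (L : List (List Char)) (hN : L.Nodup)
    (s : Multiset (List Char)) (hs : ∀ a ∈ s, a ∈ L) :
    (L.map (fun k => (s.count k : Int))).sum = (s.card : Int) := by
  induction s using Multiset.induction with
  | empty => simp
  | cons a s ih =>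
      have haL : a ∈ L := hs a (Multiset.mem_cons_self a s)
      have hs' : ∀ b ∈ s, b ∈ L := fun b hb => hs b (Multiset.mem_cons_of_mem hb)
      have hsplit : (L.map (fun k => ((a ::ₘ s).count k : Int))).sum
          = (L.map (fun k => (s.count k : Int))).sum
            + (L.map (fun k => if k = a then (1 : Int) else 0)).sum := by
        rw [← PySem.List.sum_map_add_int]
        refine congrArg List.sum (List.map_congr_left ?_)
        intro k _
        by_cases hk : k = a
        · subst hk; simp only [Multiset.count_cons_self, if_pos trivial]; push_cast; ring
        · simp [Multiset.count_cons_of_ne hk, hk]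
      rw [hsplit, ih hs', pv_sum_indicator, List.count_eq_one_of_mem hN haL]
      push_cast [Multiset.card_cons]; ring

-- |a - b| = a + b - 2*min over natural counts
theorem pv_abs_sub_counts (a b : Nat) :
    |(a : Int) - (b : Int)| = (a : Int) + (b : Int) - 2 * ((min a b : Nat) : Int) := by
  rcases Nat.le_total a b with h | h
  · rw [Nat.min_eq_left h, abs_of_nonpos (by omega)]
    omega
  · rw [Nat.min_eq_right h, abs_of_nonneg (by omega)]
    omega

-- split the union sum into counts and mins
theorem pv_sum_abs_split (L G1 G2 : List (List Char)) :
    (L.map (fun k => |(G1.count k : Int) - (G2.count k : Int)|)).sum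
      = (L.map (fun k => (G1.count k : Int))).sum
        + (L.map (fun k => (G2.count k : Int))).sum
        - 2 * (L.map (fun k => ((min (G1.count k) (G2.count k) : Nat) : Int))).sum := by
  induction L with
  | nil => simp
  | cons x L ih =>
      simp only [List.map_cons, List.sum_cons]
      rw [ih, pv_abs_sub_counts]
      ring

-- the core-library BEq on List Char and the DecidableEq-derived one are the same instance
theorem pv_beq_eq : (@instBEqOfDecidableEq (List Char) (fun a b => instDecidableEqList a b)) = (List.instBEq : BEq (List Char)) := by
  have hf : (fun (a b : List Char) => decide (a = b)) = (fun (a b : List Char) => a == b) := by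
    funext a b; by_cases h : a = b <;> simp [h]
  exact congrArg BEq.mk hf

-- the port's sorted (core LT/decidability on List Char) is Mathlib's LinearOrder sorted
theorem pv_sorted_inst (G : List (List Char)) :
    @PySem.List.sorted _ _ List.instLT (fun a b => a.decidableLT b) G (fun x => x) false
      = @PySem.List.sorted _ _ List.instLinearOrder.toLT LinearOrder.toDecidableLT G (fun x => x) false := by
  have h : (fun (a b : List Char) => a.decidableLT b) = (LinearOrder.toDecidableLT : DecidableLT (List Char)) := by
    funext a b; exact Subsingleton.elim _ _
  rw [h]

-- ===== VERDICT (by name: the statement is the Claim_ definition above) =====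
theorem qGramDistance_spec : Claim_equal_qGramDistance := by
  intro s1 s2 q _
  unfold Spec_qGramDistance qGramDistance qGramDistance_alt
  set G1 := pvGrams s1.toList q with hG1
  set G2 := pvGrams s2.toList q with hG2
  -- A's foldl is a sum over the union key list U
  simp only [PySem.Dict.keys_counter, PySem.Set.ofList_ofList, PySem.Dict.getD_counter,
             PySem.List.foldl_add (g := fun k => |(G1.count k : Int) - (G2.count k : Int)|)]
  set U := PySem.Set.union (PySem.Set.ofList G1) (PySem.Set.ofList G2) with hU
  have hUnodup : U.Nodup := PySem.Set.nodup_union _ _ (PySem.Set.nodup_ofList _)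
  have hUmem : ∀ a, a ∈ G1 ∨ a ∈ G2 → a ∈ U := by
    intro a h
    rw [hU, PySem.Set.mem_union]
    simpa [PySem.Set.mem_ofList] using h
  -- B's sorted lists
  set g1 := PySem.List.sorted G1 (fun x => x) with hg1
  set g2 := PySem.List.sorted G2 (fun x => x) with hg2
  have hp1 : ((g1 : List (List Char)) : Multiset (List Char)) = (G1 : Multiset (List Char)) :=
    Multiset.coe_eq_coe.2 (PySem.List.sorted_perm _ _ _)
  have hp2 : ((g2 : List (List Char)) : Multiset (List Char)) = (G2 : Multiset (List Char)) :=
    Multiset.coe_eq_coe.2 (PySem.List.sorted_perm _ _ _)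
  have hmc : pvMergeCount g1 g2
      = (((G1 : Multiset (List Char)) ∩ (G2 : Multiset (List Char))).card : Int) := by
    rw [pv_mergeCount_eq_card_inter g1 g2
          (by rw [hg1, pv_sorted_inst]; exact PySem.List.sorted_pairwise G1 (fun x => x))
          (by rw [hg2, pv_sorted_inst]; exact PySem.List.sorted_pairwise G2 (fun x => x)),
        hp1, hp2]
  have hl1 : (g1.length : Int) = (G1.length : Int) := by
    rw [hg1]; exact_mod_cast (PySem.List.sorted_perm G1 (fun x => x) false).length_eq
  have hl2 : (g2.length : Int) = (G2.length : Int) := by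
    rw [hg2]; exact_mod_cast (PySem.List.sorted_perm G2 (fun x => x) false).length_eq
  rw [hmc, hl1, hl2, pv_sum_abs_split]
  -- the three sums over U
  have h1 : (U.map (fun k => (G1.count k : Int))).sum = (G1.length : Int) := by
    have h := pv_sum_count_eq_card U hUnodup (G1 : Multiset (List Char))
      (fun a ha => hUmem a (Or.inl (by simpa using ha)))
    simp only [Multiset.coe_count, Multiset.coe_card] at h
    rw [pv_beq_eq] at h
    exact h
  have h2 : (U.map (fun k => (G2.count k : Int))).sum = (G2.length : Int) := by
    have h := pv_sum_count_eq_card U hUnodup (G2 : Multiset (List Char))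
      (fun a ha => hUmem a (Or.inr (by simpa using ha)))
    simp only [Multiset.coe_count, Multiset.coe_card] at h
    rw [pv_beq_eq] at h
    exact h
  have h3 : (U.map (fun k => ((min (G1.count k) (G2.count k) : Nat) : Int))).sum
      = (((G1 : Multiset (List Char)) ∩ (G2 : Multiset (List Char))).card : Int) := by
    have h := pv_sum_count_eq_card U hUnodup ((G1 : Multiset (List Char)) ∩ (G2 : Multiset (List Char)))
      (fun a ha => hUmem a (Or.inl (by simpa using Multiset.mem_of_le Multiset.inter_le_left ha)))
    rw [← h]
    refine congrArg List.sum (List.map_congr_left ?_)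
    intro k _
    rw [Multiset.count_inter, Multiset.coe_count, Multiset.coe_count, pv_beq_eq]
  rw [h1, h2, h3]
  ring
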